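-- pv_equiv track=rewrite | github.com/Kaleemulla/Kaleemulla_Projects | DpChallenge/DiskStacking.py | diskStacking
-- ===== SOURCE A (Python) =====
-- def diskStacking(disks):
--     # Since stack must have max, height and lower disk shld be bigger than upper
--     # Sort array by 1D i.e height ASC
--     disks.sort(key = lambda disk: disk[2])
--
--     heights = [disk[2] for disk in disks] # Minimum Max height at each point is self since sorted by height
--     sequences = [None for disk in disks]
--     maxHeightIdx = 0
--
--     for i in range(1, len(disks)):
--         currentDisk = disks[i]
--         for j in range(0, i):
--             otherDisk = disks[j]
--             if otherDisk[0] < currentDisk[0] and otherDisk[1] < currentDisk[1] and otherDisk[2] < currentDisk[2]: # Height check to cover if equal height then do not consider that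
--                 if heights[i] <= (currentDisk[2] + heights[j]):
--                     heights[i] = (currentDisk[2] + heights[j])
--                     sequences[i] = j
--         if heights[i] >= heights[maxHeightIdx]:
--             maxHeightIdx = i
--
--     return buildSequences(disks, sequences, maxHeightIdx)
--     pass
--
-- def buildSequences(disks, sequences, idx):
--     sequence = []
--
--     while idx is not None:
--         sequence.append(disks[idx])
--         idx = sequences[idx]
--
--     return list(reversed(sequence))
-- ===== SOURCE B (Python) =====
-- # Same DP order, but each step keeps (height, full stack) pairs chosen by a
-- # last-max fold, so the back-pointer array and reconstruction pass disappear.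
-- # Like A, this sorts `disks` in place (same observable mutation).
--
-- def pickLast(options):
--     top = options[0]
--     for o in options[1:]:
--         if o[0] >= top[0]:
--             top = o
--     return top
--
-- def diskStacking(disks):
--     disks.sort(key=lambda d: d[2])
--     best = []
--     for d in disks:
--         options = [(d[2], [d])] + [(h + d[2], s + [d]) for (h, s) in best
--                    if s[-1][0] < d[0] and s[-1][1] < d[1] and s[-1][2] < d[2]]
--         best.append(pickLast(options))
--     return pickLast(best)[1]
-- ===== Notes on version B (the rewrite author's own statement) =====
-- stated objective: alternative
-- what changed: B keeps the height-sorted O(n^2) DP but stores a (height, full stack) pair per disk, chosen with a last-max fold over candidate extensions built by a filter/map comprehension, so A's parallel heights/back-pointer arrays, index bookkeeping and separate backward reconstruction pass all disappear.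
import Mathlib
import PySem

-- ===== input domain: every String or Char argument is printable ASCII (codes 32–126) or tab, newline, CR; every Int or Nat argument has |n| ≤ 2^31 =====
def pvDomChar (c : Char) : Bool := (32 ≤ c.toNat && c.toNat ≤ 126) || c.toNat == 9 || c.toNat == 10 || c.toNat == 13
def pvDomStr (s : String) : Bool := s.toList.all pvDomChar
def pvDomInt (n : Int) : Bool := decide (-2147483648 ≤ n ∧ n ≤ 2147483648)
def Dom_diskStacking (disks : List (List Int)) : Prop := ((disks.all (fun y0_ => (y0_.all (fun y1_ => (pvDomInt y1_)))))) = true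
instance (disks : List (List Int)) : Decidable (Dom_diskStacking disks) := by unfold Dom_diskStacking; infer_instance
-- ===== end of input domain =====

-- B keeps A's sorted order and DP recurrence but stores (height, full stack) pairs chosen by a
-- last-max fold, removing the back-pointer array and the separate reconstruction pass (objective:
-- alternative).  Both A and B sort the argument list in place in Python; equivalence here is about
-- the return value.

-- ===== PORT A =====
-- inner loop body of A (over j), factored as a helper
def innerStep (ds : List (List Int)) (heights : List Int) (cur : List Int)
    (p : Int × Option Nat) (j : Nat) : Int × Option Nat :=
  let other := ds.getD j []
  if other.getD 0 0 < cur.getD 0 0 ∧ other.getD 1 0 < cur.getD 1 0 ∧ other.getD 2 0 < cur.getD 2 0 then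
    (if p.1 ≤ cur.getD 2 0 + heights.getD j 0 then (cur.getD 2 0 + heights.getD j 0, some j) else p)
  else p

-- outer loop body of A (over i)
def stepA (ds : List (List Int)) (st : List Int × List (Option Nat) × Nat) (i : Nat) :
    List Int × List (Option Nat) × Nat :=
  let heights := st.1
  let seqs := st.2.1
  let maxIdx := st.2.2
  let cur := ds.getD i []
  let p := (List.range' 0 i).foldl (innerStep ds heights cur) (heights.getD i 0, seqs.getD i none)
  let heights' := heights.set i p.1
  let seqs' := seqs.set i p.2
  let maxIdx' := if heights'.getD maxIdx 0 ≤ heights'.getD i 0 then i else maxIdx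
  (heights', seqs', maxIdx')

-- the while-loop of buildSequences; fuel `disks.length` suffices since back-pointers strictly decrease
def buildSeqLoop (disks : List (List Int)) (seqs : List (Option Nat)) : Nat → Option Nat → List (List Int)
  | _, none => []
  | 0, some _ => []
  | fuel+1, some idx => disks.getD idx [] :: buildSeqLoop disks seqs fuel (seqs.getD idx none)

def buildSequences (disks : List (List Int)) (seqs : List (Option Nat)) (idx : Nat) : List (List Int) :=
  (buildSeqLoop disks seqs disks.length (some idx)).reverse

def diskStacking (disks : List (List Int)) : List (List Int) :=
  let ds := PySem.List.sorted disks (fun d => d.getD 2 0)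
  let heights := ds.map (fun d => d.getD 2 0)
  let seqs : List (Option Nat) := ds.map (fun _ => none)
  let st := (List.range' 1 (ds.length - 1)).foldl (stepA ds) (heights, seqs, 0)
  buildSequences ds st.2.1 st.2.2

-- ===== PORT B =====
-- loop body of pickLast: later option wins ties
def bstep (top o : Int × List (List Int)) : Int × List (List Int) :=
  if top.1 ≤ o.1 then o else top

def pickLast (options : List (Int × List (List Int))) : Int × List (List Int) :=
  match options with
  | [] => ((0 : Int), ([] : List (List Int)))  -- Python raises IndexError here (outside Pre_)
  | top :: rest => rest.foldl bstep top

-- the comprehension's filter condition (s[-1] is the top disk of a kept stack)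
def qB (d : List Int) (hs : Int × List (List Int)) : Bool :=
  decide ((PySem.List.pyGetD hs.2 (-1) []).getD 0 0 < d.getD 0 0) &&
  decide ((PySem.List.pyGetD hs.2 (-1) []).getD 1 0 < d.getD 1 0) &&
  decide ((PySem.List.pyGetD hs.2 (-1) []).getD 2 0 < d.getD 2 0)

-- the comprehension's map
def fB (d : List Int) (hs : Int × List (List Int)) : Int × List (List Int) :=
  (hs.1 + d.getD 2 0, hs.2 ++ [d])

-- loop body of B (over the disks)
def stepB (best : List (Int × List (List Int))) (d : List Int) : List (Int × List (List Int)) :=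
  let options := (d.getD 2 0, [d]) :: (best.filter (qB d)).map (fB d)
  best ++ [pickLast options]

def diskStacking_alt (disks : List (List Int)) : List (List Int) :=
  let ds := PySem.List.sorted disks (fun d => d.getD 2 0)
  (pickLast (ds.foldl stepB [])).2

-- ===== PRECONDITION & SPEC =====
-- Pre_ excludes exactly the inputs where the Python A raises: the empty list (IndexError in the
-- final reconstruction) and any disk with fewer than 3 entries (IndexError on disk[2]).
def Pre_diskStacking (disks : List (List Int)) : Prop :=
  disks ≠ [] ∧ ∀ d ∈ disks, 3 ≤ d.length
instance (disks : List (List Int)) : Decidable (Pre_diskStacking disks) := by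
  unfold Pre_diskStacking; infer_instance

def pvWitness_diskStacking : List (List Int) := [[2, 2, 2], [1, 1, 1], [3, 3, 3]]

def Spec_diskStacking (disks : List (List Int)) (out : List (List Int)) : Prop := out = diskStacking_alt disks
instance (disks : List (List Int)) (out : List (List Int)) : Decidable (Spec_diskStacking disks out) := by unfold Spec_diskStacking; infer_instance

-- ===== CLAIM (what is proved, stated in full; the proofs are below) =====
def Claim_equal_diskStacking : Prop := ∀ (disks : List (List Int)), Dom_diskStacking disks → Pre_diskStacking disks → Spec_diskStacking disks (diskStacking disks)

-- ===== LEMMAS AND PROOFS =====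

-- abstraction of A's inner-loop state as B's (height, stack) pair
def absP (L0 : List (Int × List (List Int))) (cur : List Int) (p : Int × Option Nat) :
    Int × List (List Int) :=
  (p.1, match p.2 with | none => [cur] | some j => (L0.getD j (0, [])).2 ++ [cur])

theorem inner_eq (ds : List (List Int)) (L0 : List (Int × List (List Int))) (cur : List Int)
    (H : List Int)
    (hcorr : ∀ j, j < L0.length →
      H.getD j 0 = (L0.getD j (0, [])).1 ∧
      PySem.List.pyGetD (L0.getD j (0, [])).2 (-1) [] = ds.getD j []) :
    ∀ (k a : Nat) (p : Int × Option Nat), a + k = L0.length →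
      (∀ j, p.2 = some j → j < L0.length) →
      absP L0 cur ((List.range' a k).foldl (innerStep ds H cur) p)
        = (((L0.drop a).filter (qB cur)).map (fB cur)).foldl bstep (absP L0 cur p)
      ∧ ∀ j, ((List.range' a k).foldl (innerStep ds H cur) p).2 = some j → j < L0.length := by
  intro k
  induction k with
  | zero =>
    intro a p hlen hp
    have hdrop : L0.drop a = [] := List.drop_eq_nil_of_le (by omega)
    simpa [hdrop] using hp
  | succ k ih =>
    intro a p hlen hp
    have ha : a < L0.length := by omega
    have hget : L0.getD a (0, []) = L0[a] := List.getD_eq_getElem _ _ ha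
    obtain ⟨h1, h2⟩ := hcorr a ha
    rw [hget] at h1 h2
    have hdrop : L0.drop a = L0[a] :: L0.drop (a + 1) := List.drop_eq_getElem_cons ha
    have hrange : List.range' a (k + 1) = a :: List.range' (a + 1) k := List.range'_succ
    rw [hrange, hdrop]
    simp only [List.foldl_cons, List.filter_cons]
    have hcond : (qB cur L0[a] = true) ↔
        ((ds.getD a []).getD 0 0 < cur.getD 0 0 ∧ (ds.getD a []).getD 1 0 < cur.getD 1 0 ∧
          (ds.getD a []).getD 2 0 < cur.getD 2 0) := by
      simp only [qB, Bool.and_eq_true, decide_eq_true_eq, h2]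
      tauto
    by_cases hc : ((ds.getD a []).getD 0 0 < cur.getD 0 0 ∧ (ds.getD a []).getD 1 0 < cur.getD 1 0 ∧
        (ds.getD a []).getD 2 0 < cur.getD 2 0)
    · have hq : qB cur L0[a] = true := hcond.mpr hc
      rw [hq]
      simp only [if_true, List.map_cons, List.foldl_cons]
      have hstep : innerStep ds H cur p a =
          (if p.1 ≤ cur.getD 2 0 + H.getD a 0 then (cur.getD 2 0 + H.getD a 0, some a) else p) := by
        simp only [innerStep]
        rw [if_pos hc]
      by_cases hle : p.1 ≤ cur.getD 2 0 + H.getD a 0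
      · rw [hstep, if_pos hle]
        have htop : bstep (absP L0 cur p) (fB cur L0[a]) =
            absP L0 cur (cur.getD 2 0 + H.getD a 0, some a) := by
          simp only [bstep, fB, absP]
          split_ifs with h
          · simp [h1, Int.add_comm, hget, -List.getD_eq_getElem?_getD]
          · rw [h1] at hle; exact absurd (by omega : p.1 ≤ L0[a].1 + cur.getD 2 0) h
        rw [htop]
        exact ih (a + 1) _ (by omega) (by intro j hj; simp at hj; omega)
      · rw [hstep, if_neg hle]
        have htop : bstep (absP L0 cur p) (fB cur L0[a]) = absP L0 cur p := by
          simp only [bstep, fB, absP]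
          split_ifs with h
          · rw [h1] at hle; exact absurd (by omega : p.1 ≤ cur.getD 2 0 + L0[a].1) hle
          · rfl
        rw [htop]
        exact ih (a + 1) _ (by omega) hp
    · have hq : qB cur L0[a] = false := by
        rw [← Bool.not_eq_true]; exact fun h => hc (hcond.mp h)
      rw [hq]
      simp only [Bool.false_eq_true, if_false]
      have hstep : innerStep ds H cur p a = p := by
        simp only [innerStep]
        rw [if_neg hc]
      rw [hstep]
      exact ih (a + 1) _ (by omega) hp

-- small getD utilities used throughout the outer invariant
theorem pv_getD_set_ne {α : Type} (l : List α) (i t : Nat) (v d : α) (h : t ≠ i) :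
    (l.set i v).getD t d = l.getD t d := by
  simp [List.getD_eq_getElem?_getD, List.getElem?_set_ne (by omega : i ≠ t)]

theorem pv_getD_set_self {α : Type} (l : List α) (i : Nat) (v d : α) (h : i < l.length) :
    (l.set i v).getD i d = v := by
  simp [List.getD_eq_getElem?_getD, h]

theorem pv_getD_append_lt {α : Type} (B : List α) (x d : α) (t : Nat) (h : t < B.length) :
    (B ++ [x]).getD t d = B.getD t d := by
  simp [List.getD_eq_getElem?_getD, List.getElem?_append_left h]

theorem pv_getD_append_len {α : Type} (B : List α) (x d : α) :
    (B ++ [x]).getD B.length d = x := by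
  simp [List.getD_eq_getElem?_getD]

theorem pv_getD_map_key (ds : List (List Int)) (t : Nat) (h : t < ds.length) :
    (ds.map (fun d => d.getD 2 0)).getD t 0 = (ds.getD t []).getD 2 0 := by
  rw [List.getD_eq_getElem _ _ (by simpa using h), List.getD_eq_getElem _ _ h]
  simp

theorem pv_getD_map_none (ds : List (List Int)) (t : Nat) :
    (ds.map (fun _ => (none : Option Nat))).getD t none = none := by
  rcases Nat.lt_or_ge t ds.length with h | h
  · rw [List.getD_eq_getElem _ _ (by simpa using h)]
    simp
  · simp [List.getD_eq_getElem?_getD]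

theorem pickLast_append (B : List (Int × List (List Int))) (x : Int × List (List Int))
    (h : B ≠ []) : pickLast (B ++ [x]) = bstep (pickLast B) x := by
  cases B with
  | nil => exact absurd rfl h
  | cons b rest => simp [pickLast, List.foldl_append]

-- the full invariant tying A's (heights, back-pointers, argmax) to B's list of (height, stack)
def PInv (ds : List (List Int)) (m : Nat) (st : List Int × List (Option Nat) × Nat)
    (B : List (Int × List (List Int))) : Prop :=
  B.length = m + 1
  ∧ st.1.length = ds.length ∧ st.2.1.length = ds.length
  ∧ (∀ t, t ≤ m → st.1.getD t 0 = (B.getD t (0, [])).1)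
  ∧ (∀ t, m < t → t < ds.length →
       st.1.getD t 0 = (ds.getD t []).getD 2 0 ∧ st.2.1.getD t none = none)
  ∧ (∀ t, t ≤ m → (match st.2.1.getD t none with
       | none => (B.getD t (0, [])).2 = [ds.getD t []]
       | some j => j < t ∧ (B.getD t (0, [])).2 = (B.getD j (0, [])).2 ++ [ds.getD t []]))
  ∧ (∀ t, t ≤ m → PySem.List.pyGetD (B.getD t (0, [])).2 (-1) [] = ds.getD t [])
  ∧ st.2.2 ≤ m
  ∧ pickLast B = B.getD st.2.2 (0, [])

theorem outer_inv (ds : List (List Int)) :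
    ∀ m, m + 1 ≤ ds.length →
    PInv ds m
      ((List.range' 1 m).foldl (stepA ds) (ds.map (fun d => d.getD 2 0), ds.map (fun _ => none), 0))
      ((ds.take (m + 1)).foldl stepB []) := by
  intro m
  induction m with
  | zero =>
    intro hm
    cases ds with
    | nil => simp at hm
    | cons d0 tl =>
      have hB : (((d0 :: tl).take 1).foldl stepB []) = [(d0.getD 2 0, [d0])] := by
        simp [stepB, pickLast]
      rw [hB]
      refine ⟨by simp, by simp, by simp, ?_, ?_, ?_, ?_, le_refl 0, by simp [pickLast]⟩
      · intro t ht
        interval_cases t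
        simp
      · intro t ht1 ht2
        exact ⟨pv_getD_map_key _ t ht2, pv_getD_map_none _ t⟩
      · intro t ht
        interval_cases t
        simp
      · intro t ht
        interval_cases t
        have h := PySem.List.pyGetD_neg_one_append_singleton ([] : List (List Int)) d0 ([] : List Int)
        simpa using h
  | succ m ih =>
    intro hm
    have IH := ih (by omega)
    set stm := (List.range' 1 m).foldl (stepA ds)
      (ds.map (fun d => d.getD 2 0), ds.map (fun _ => none), 0) with hstm
    set Bm := (ds.take (m + 1)).foldl stepB [] with hBm
    obtain ⟨hBlen, hHlen, hSlen, h3, h4, h5, h7, hM, hpick⟩ := IH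
    have hi : m + 1 < ds.length := by omega
    have hr : List.range' 1 (m + 1) = List.range' 1 m ++ [m + 1] := by
      have := List.range'_concat (s := 1) (n := m) (step := 1)
      simpa [Nat.add_comm] using this
    have e1 : (List.range' 1 (m + 1)).foldl (stepA ds)
        (ds.map (fun d => d.getD 2 0), ds.map (fun _ => none), 0) = stepA ds stm (m + 1) := by
      rw [hr, List.foldl_append, ← hstm]
      rfl
    have htake : ds.take (m + 2) = ds.take (m + 1) ++ [ds[m + 1]] := by
      rw [List.take_add_one]
      simp [List.getElem?_eq_getElem hi]
    have e2 : (ds.take (m + 2)).foldl stepB [] = stepB Bm ds[m + 1] := by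
      rw [htake, List.foldl_append, ← hBm]
      rfl
    rw [e1, e2]
    -- names for A's state and the current disk
    have hcur : ds.getD (m + 1) [] = ds[m + 1] := List.getD_eq_getElem _ _ hi
    obtain ⟨hHi, hSi⟩ := h4 (m + 1) (by omega) hi
    -- the inner loop matched against B's option list
    have hcorr : ∀ j, j < Bm.length →
        stm.1.getD j 0 = (Bm.getD j (0, [])).1 ∧
        PySem.List.pyGetD (Bm.getD j (0, [])).2 (-1) [] = ds.getD j [] := by
      intro j hj
      exact ⟨h3 j (by omega), h7 j (by omega)⟩
    obtain ⟨habs, hjlt⟩ := inner_eq ds Bm (ds.getD (m + 1) []) stm.1 hcorr (m + 1) 0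
      (stm.1.getD (m + 1) 0, stm.2.1.getD (m + 1) none)
      (by omega)
      (by intro j hj
          change stm.2.1.getD (m + 1) none = some j at hj
          rw [hSi] at hj
          cases hj)
    set p := (List.range' 0 (m + 1)).foldl (innerStep ds stm.1 (ds.getD (m + 1) []))
      (stm.1.getD (m + 1) 0, stm.2.1.getD (m + 1) none) with hp
    set bnew := pickLast ((ds[m + 1].getD 2 0, [ds[m + 1]]) ::
      (Bm.filter (qB ds[m + 1])).map (fB ds[m + 1])) with hbnew
    have habs' : absP Bm (ds.getD (m + 1) []) p = bnew := by
      rw [habs, hbnew]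
      have hinit : absP Bm (ds.getD (m + 1) [])
          (stm.1.getD (m + 1) 0, stm.2.1.getD (m + 1) none)
          = (ds[m + 1].getD 2 0, [ds[m + 1]]) := by
        simp only [absP]
        rw [hHi, hSi, hcur]
      rw [hinit, hcur]
      simp [pickLast]
    have hstepA : stepA ds stm (m + 1)
        = (stm.1.set (m + 1) p.1, stm.2.1.set (m + 1) p.2,
           if (stm.1.set (m + 1) p.1).getD stm.2.2 0 ≤ (stm.1.set (m + 1) p.1).getD (m + 1) 0
           then m + 1 else stm.2.2) := by
      rfl
    have hstepB : stepB Bm ds[m + 1] = Bm ++ [bnew] := by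
      rfl
    rw [hstepA, hstepB]
    have hb1 : bnew.1 = p.1 := by rw [← habs']; rfl
    have hiB : m + 1 = Bm.length := hBlen.symm
    refine ⟨by simp [hBlen], by simp [hHlen], by simp [hSlen], ?_, ?_, ?_, ?_, ?_, ?_⟩
    · -- heights ↔ stored heights
      intro t ht
      rcases Nat.lt_or_ge t (m + 1) with h | h
      · rw [pv_getD_set_ne _ _ _ _ _ (by omega), pv_getD_append_lt _ _ _ _ (by omega)]
        exact h3 t (by omega)
      · have ht' : t = m + 1 := by omega
        subst ht'
        rw [pv_getD_set_self _ _ _ _ (by omega), hiB, pv_getD_append_len]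
        exact hb1.symm
    · -- untouched suffix
      intro t ht1 ht2
      rw [pv_getD_set_ne _ _ _ _ _ (by omega), pv_getD_set_ne _ _ _ _ _ (by omega)]
      exact h4 t (by omega) ht2
    · -- stack shape
      intro t ht
      rcases Nat.lt_or_ge t (m + 1) with h | h
      · rw [pv_getD_set_ne _ _ _ _ _ (by omega), pv_getD_append_lt _ _ _ _ (by omega)]
        have := h5 t (by omega)
        rcases hS : stm.2.1.getD t none with _ | j
        · rw [hS] at this
          simpa using this
        · rw [hS] at this
          obtain ⟨hj1, hj2⟩ := this
          exact ⟨hj1, by rw [pv_getD_append_lt _ _ _ _ (by omega)]; exact hj2⟩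
      · have ht' : t = m + 1 := by omega
        subst ht'
        rw [pv_getD_set_self _ _ _ _ (by omega), hiB, pv_getD_append_len]
        rcases hp2 : p.2 with _ | j
        · have : bnew.2 = [ds.getD (m + 1) []] := by
            rw [← habs']
            simp [absP, hp2]
          rw [← hiB]
          simpa [hp2] using this
        · have hjlt' : j < Bm.length := hjlt j hp2
          have : bnew.2 = (Bm.getD j (0, [])).2 ++ [ds.getD (m + 1) []] := by
            rw [← habs']
            simp [absP, hp2]
          rw [← hiB]
          refine ⟨by omega, ?_⟩
          rw [pv_getD_append_lt _ _ _ _ (by omega)]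
          exact this
    · -- top disk of each stack
      intro t ht
      rcases Nat.lt_or_ge t (m + 1) with h | h
      · rw [pv_getD_append_lt _ _ _ _ (by omega)]
        exact h7 t (by omega)
      · have ht' : t = m + 1 := by omega
        subst ht'
        rw [hiB, pv_getD_append_len, ← hiB]
        rcases hp2 : p.2 with _ | j
        · have : bnew.2 = [ds.getD (m + 1) []] := by
            rw [← habs']
            simp [absP, hp2]
          rw [this]
          have h := PySem.List.pyGetD_neg_one_append_singleton ([] : List (List Int))
            (ds.getD (m + 1) []) ([] : List Int)
          simpa using h
        · have : bnew.2 = (Bm.getD j (0, [])).2 ++ [ds.getD (m + 1) []] := by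
            rw [← habs']
            simp [absP, hp2]
          rw [this]
          exact PySem.List.pyGetD_neg_one_append_singleton _ _ _
    · -- argmax bound
      dsimp only
      split_ifs <;> omega
    · -- pickLast tracks the argmax index
      have hpl : pickLast (Bm ++ [bnew]) = bstep (pickLast Bm) bnew :=
        pickLast_append Bm bnew (by intro hnil; rw [hnil] at hBlen; simp at hBlen)
      rw [hpl, hpick]
      have hMne : stm.2.2 ≠ m + 1 := by omega
      have hgM : (stm.1.set (m + 1) p.1).getD stm.2.2 0 = (Bm.getD stm.2.2 (0, [])).1 := by
        rw [pv_getD_set_ne _ _ _ _ _ hMne]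
        exact h3 stm.2.2 hM
      have hgi : (stm.1.set (m + 1) p.1).getD (m + 1) 0 = bnew.1 := by
        rw [pv_getD_set_self _ _ _ _ (by omega), hb1]
      rw [hgM, hgi]
      simp only [bstep]
      split_ifs with h
      · rw [hiB, pv_getD_append_len]
      · rw [pv_getD_append_lt _ _ _ _ (by omega)]

theorem buildSeq_eq (ds : List (List Int)) (S : List (Option Nat)) (B : List (Int × List (List Int)))
    (h5 : ∀ t, t < ds.length → (match S.getD t none with
      | none => (B.getD t (0, [])).2 = [ds.getD t []]
      | some j => j < t ∧ (B.getD t (0, [])).2 = (B.getD j (0, [])).2 ++ [ds.getD t []])) :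
    ∀ fuel t, t < ds.length → t < fuel →
      (buildSeqLoop ds S fuel (some t)).reverse = (B.getD t (0, [])).2 := by
  intro fuel
  induction fuel with
  | zero =>
    intro t ht hf
    omega
  | succ fuel ih =>
    intro t ht hf
    have h := h5 t ht
    rcases hS : S.getD t none with _ | j
    · rw [hS] at h
      simp only [buildSeqLoop]
      rw [hS]
      simp only [buildSeqLoop, List.reverse_cons, List.reverse_nil, List.nil_append]
      exact h.symm
    · rw [hS] at h
      obtain ⟨hj, he⟩ := h
      have hrec := ih j (by omega) (by omega)
      simp only [buildSeqLoop]
      rw [hS, List.reverse_cons, hrec, he]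

-- ===== VERDICT (by name: the statement is the Claim_ definition above) =====
theorem diskStacking_spec : Claim_equal_diskStacking := by
  intro disks _ hpre
  unfold Spec_diskStacking
  set ds := PySem.List.sorted disks (fun d => d.getD 2 0) with hds
  have hlen : ds.length = disks.length := PySem.List.length_sorted _ _ _
  have hne : 1 ≤ ds.length := by
    rw [hlen]
    have := List.length_pos_of_ne_nil hpre.1
    omega
  have hinv := outer_inv ds (ds.length - 1) (by omega)
  have htake : ds.take (ds.length - 1 + 1) = ds := by
    rw [show ds.length - 1 + 1 = ds.length from by omega]
    exact List.take_length
  rw [htake] at hinv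
  set st := (List.range' 1 (ds.length - 1)).foldl (stepA ds)
    (ds.map (fun d => d.getD 2 0), ds.map (fun _ => none), 0) with hst
  set B := ds.foldl stepB [] with hB
  obtain ⟨hBlen, hHlen, hSlen, h3, h4, h5, h7, hM, hpick⟩ := hinv
  have eA : diskStacking disks = buildSequences ds st.2.1 st.2.2 := rfl
  have eB : diskStacking_alt disks = (pickLast B).2 := rfl
  rw [eA, eB, hpick]
  unfold buildSequences
  exact buildSeq_eq ds st.2.1 B (fun t ht => h5 t (by omega)) ds.length st.2.2
    (by omega) (by omega)
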